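/- GENERATED by tools/from_farm_form.py from prooffarm-gif/accepted/DGifDecompressLine.1/Lemmas.lean (a worked proof of the farm's unit `DGifDecompressLine.1`,
   accepted by the verdict) — do not edit. -/
import Gif.Spec.Units.DGifDecompressLine_1
import Gif.Spec.AllSegs

/-!
  Lemmas for the unit `DGifDecompressLine.1` (segment 1 of the LZW decoder, dgif_lib.c:866-880: `Private`, the five checked loads of
  pv's fields, the spills of the constant locals, the tests of l.876 and l.880).

  `Body.carry` of Gif/Spec/LzwCarry.lean does NOT serve this segment: its `Scratch` windows exclude the slots of the constant locals
  (`Stack`, `ClearCode`, `Suffix`, `EOFCode`, the shadow index), and THIS segment is the one that stores them. What is proved here: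

      dl1_Win                 a window this segment stores to: the function's stack below `RA − 120`, off the three argument slots
      dl1_carry               `Body` through a footprint of such windows; the measure and every field of pv unchanged
      dl1_sp_small            the test of l.876 cannot fire: `StackPtr ≤ 4095` refutes the walker's branch fact
      dl1_addr_add            `&pv->field` as a number: `(UInt64.ofNat p + k).toNat = p + k`
-/

open X86 X86.User Asan ProgX.Base ProgX.Base.Spec Gif.Spec

namespace Gif.Spec.DGifDecompressLine_1

/-- **A WINDOW SEGMENT 1 MAY STORE TO** (`RA` = the entry's `rsp`; the body's stack pointer is `RA − 200`): the function's stack below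
the protected frame (`[RA − 560, RA − 120)`), off the slots of the three arguments `GifFile`, `LineLen` (`[RA − 168, RA − 156)`) and
`Line` (`[RA − 152, RA − 144)`). The return addresses of the check routines, the slots of the constant locals, `LastCode`, the two
spills and the shadow index are all such windows. -/
def dl1_Win (e : State) (w : Span) : Prop :=
  ((e.reg .rsp).toNat - 560 ≤ w.lo ∧ w.hi ≤ (e.reg .rsp).toNat - 168) ∨
  ((e.reg .rsp).toNat - 156 ≤ w.lo ∧ w.hi ≤ (e.reg .rsp).toNat - 152) ∨
  ((e.reg .rsp).toNat - 144 ≤ w.lo ∧ w.hi ≤ (e.reg .rsp).toNat - 120)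

/-- **`Body` THROUGH THE STORES OF SEGMENT 1.** `v` is a state with `Body`, `s` a later state of the segment: the stack pointer is the
body's, the text is unchanged, the ABI's invariant holds, no shadow byte was written, and every window written is a `dl1_Win` window
(stack only). Then `Body` holds of `s` (at the address `s` is at), the measure of the main loop is what it was, and every read of the
heap's region (`0x800000 ≤ a`: the fields of pv that `Locals` mentions) gives what it gave. -/
theorem dl1_carry {cut cut' : Word} {H : Heap} {rest : List Obj} {frames : List (Nat × FrameLayout)} {F : Forest} {R : Rd}
    {n : Nat} {u₀ e : State} {ret : Word} {v s : State}
    (hb : DGifDecompressLine.Body cut H rest frames F R n u₀ e ret v)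
    (hrip : s.rip = cut') (hrsp : s.reg .rsp = e.reg .rsp - 200)
    (hcode : Mem.EqOn ProgX.Base.L.textLo ProgX.Base.L.textHi u₀.mem s.mem) (habi : (conv u₀).inv s)
    {ws : List Span} (hun : ShadowUntouched v.mem s.mem) (hs : Mem.SameExcept ws v.mem s.mem)
    (hws : ∀ w, w ∈ ws → dl1_Win e w) :
    DGifDecompressLine.Body cut' H rest frames F R n u₀ e ret s ∧
    mu R s.mem F.pv = mu R v.mem F.pv ∧
    (∀ a k : Nat, 0x800000 ≤ a → a + k < 2 ^ 64 → rd s.mem a k = rd v.mem a k) := by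
  have henv : Env H rest frames F R e := hb.pre.1
  have hroom : 0x700000 + 560 ≤ (e.reg .rsp).toNat := hb.entry.room
  have htop : (e.reg .rsp).toNat + 8 ≤ 0x800000 := hb.entry.top
  have hok := hb.inv.heap
  have hcur := henv.ctx.cursor_range henv.heap.inv.shadow
  have hplaced := hb.ok.owns.placed hok
  have hpin := hb.pv_inside
  -- every window lies in the stack, below the entry's stack pointer
  have hstack : ∀ w, w ∈ ws → (e.reg .rsp).toNat - 560 ≤ w.lo ∧ w.hi ≤ (e.reg .rsp).toNat - 120 := by
    intro w hw
    rcases hws w hw with ⟨a, b⟩ | ⟨a, b⟩ | ⟨a, b⟩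
    · omega
    · omega
    · omega
  -- every window is loose
  have hloose : ∀ w, w ∈ ws → Loose H F R w := by
    intro w hw
    have hw' := hstack w hw
    exact Loose.stack hok (by omega) (by omega) (by omega)
  -- every window is a heap window
  have hwin : ∀ w, w ∈ ws → HeapWin H w := by
    intro w hw
    have hw' := hstack w hw
    apply HeapWin.offHeap hok
    left
    have hbase := henv.heap.base
    omega
  -- every window misses the cursor
  have hoffcur : ∀ w, w ∈ ws → w.hi ≤ R.cur ∨ R.cur + 16 ≤ w.lo := by
    intro w hw
    exact (hloose w hw).off_cursor hok hplaced ⟨hcur.1, hcur.2.1⟩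
  -- every window misses the private object
  have hoffpv : ∀ w, w ∈ ws → w.hi ≤ F.pv := by
    intro w hw
    have hw' := hstack w hw
    omega
  -- every window misses the slots of `Body`
  have hslots : ∀ a k : Nat,
      (((e.reg .rsp).toNat - 168 ≤ a ∧ a + k ≤ (e.reg .rsp).toNat - 156) ∨
       ((e.reg .rsp).toNat - 152 ≤ a ∧ a + k ≤ (e.reg .rsp).toNat - 144) ∨
       ((e.reg .rsp).toNat - 120 ≤ a ∧ a + k ≤ (e.reg .rsp).toNat + 8)) →
      ∀ w, w ∈ ws → a + k ≤ w.lo ∨ w.hi ≤ a := by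
    intro a k hak w hw
    rcases hws w hw with ⟨p, q⟩ | ⟨p, q⟩ | ⟨p, q⟩
    · omega
    · omega
    · omega
  -- the footprint since the entry: every window lies inside the function's stack
  have hsameE : Mem.SameExcept
      [⟨(e.reg .rsp).toNat - 560, (e.reg .rsp).toNat⟩,
       shadowSpan ((e.reg .rsp).toNat - 120) ((e.reg .rsp).toNat - 56),
       ⟨(e.reg .rsi).toNat, (e.reg .rsi).toNat + n⟩,
       ⟨F.pv + 20, F.pv + 56⟩,
       ⟨F.pv + 88, F.pv + 344⟩,
       ⟨F.pv + 344, F.pv + 4439⟩,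
       ⟨F.pv + 4439, F.pv + 8535⟩,
       ⟨F.pv + 8536, F.pv + 24920⟩,
       ⟨F.gif + 96, F.gif + 100⟩,
       ⟨R.cur, R.cur + 8⟩] e.mem s.mem := by
    apply Mem.SameExcept.step_same' hb.same hs
    intro w hw
    have hw' := hstack w hw
    by_cases hempty : w.hi ≤ w.lo
    · left
      exact hempty
    right
    exact ⟨⟨(e.reg .rsp).toNat - 560, (e.reg .rsp).toNat⟩, by simp only [List.mem_cons, true_or], by simp only; omega,
      by simp only; omega⟩
  have e_rem : Gif.Spec.rem R s.mem = Gif.Spec.rem R v.mem := rem_sameExcept hs (by omega) hoffcur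
  have hlz : LZOK s.mem F.pv := by
    apply hb.lz.sameExcept hs (by omega)
    intro w hw
    have := hoffpv w hw
    omega
  refine ⟨⟨hb.entry, hb.pre, hb.apart, hrip, hrsp, ?_, ?_, ?_, ?_, ?_, ?_, ?_, ?_, ?_, ?_, ?_, ?_, hlz, ?_, hsameE,
    ProgX.Base.conv_code_in hcode, habi⟩, ?_, ?_⟩
  · exact slot_sameExcept hs (e.reg .rsp) 8 8 _ (by omega) (by omega) hb.slot_r15 (hslots _ _ (by omega))
  · exact slot_sameExcept hs (e.reg .rsp) 16 8 _ (by omega) (by omega) hb.slot_r14 (hslots _ _ (by omega))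
  · exact slot_sameExcept hs (e.reg .rsp) 24 8 _ (by omega) (by omega) hb.slot_r13 (hslots _ _ (by omega))
  · exact slot_sameExcept hs (e.reg .rsp) 32 8 _ (by omega) (by omega) hb.slot_r12 (hslots _ _ (by omega))
  · exact slot_sameExcept hs (e.reg .rsp) 40 8 _ (by omega) (by omega) hb.slot_rbp (hslots _ _ (by omega))
  · exact slot_sameExcept hs (e.reg .rsp) 48 8 _ (by omega) (by omega) hb.slot_rbx (hslots _ _ (by omega))
  · rw [hs.readLE (e.reg .rsp) 8 (by omega) (hslots _ _ (by omega))]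
    exact hb.slot_ra
  · exact slot_sameExcept hs (e.reg .rsp) 168 8 _ (by omega) (by omega) hb.s_gif (hslots _ _ (by omega))
  · exact slot_sameExcept hs (e.reg .rsp) 160 4 _ (by omega) (by omega) hb.s_len (hslots _ _ (by omega))
  · exact slot_sameExcept hs (e.reg .rsp) 152 8 _ (by omega) (by omega) hb.s_line (hslots _ _ (by omega))
  · exact hb.inv.sameExcept hun hs hwin
  · exact hb.ok.sameExcept hok ⟨hcur.1, hcur.2.1⟩ hs hloose
  · rw [e_rem]
    exact hb.rem
  · apply mu_sameExcept hs (by omega) (by omega) hoffcur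
    · intro w hw
      have := hoffpv w hw
      omega
    · intro w hw
      have := hoffpv w hw
      omega
  · intro a k ha hk
    apply hs.rd a k hk
    intro w hw
    have hw' := hstack w hw
    omega

/-- **The test of l.876 cannot fire** (`cmp ebx, 0FFFH ; jg`): for `StackPtr ≤ 4095` [LZ5] the walker's branch fact of the taken arm
is false. -/
theorem dl1_sp_small (sp : Nat) (hsp : sp ≤ 4095) : ¬ (4095#32).toInt < (BitVec.ofNat 32 sp).toInt := by
  have e4095 : (4095#32).toInt = 4095 := by decide
  have hnat : (BitVec.ofNat 32 sp).toNat = sp := by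
    rw [BitVec.toNat_ofNat]
    exact Nat.mod_eq_of_lt (by omega)
  have hint : (BitVec.ofNat 32 sp).toInt = (sp : Int) := by
    rw [Gif.Spec.toInt_of_lt _ (by omega), hnat]
  rw [e4095, hint]
  omega

/-- **The address of a field, as a number** (`lea rax, [r14+2158H]` with `r14 = UInt64.ofNat pv`): no wrap-around. (`u_omega` proves
the instances in an empty context; inside the walk's context it runs out of recursion depth on the large literals.) -/
theorem dl1_addr_add (p k : Nat) (h : p + k < 2 ^ 64) : (UInt64.ofNat p + UInt64.ofNat k).toNat = p + k := by
  rw [UInt64.toNat_add, UInt64.toNat_ofNat', UInt64.toNat_ofNat']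
  have h1 : p % 2 ^ 64 = p := Nat.mod_eq_of_lt (by omega)
  have h2 : k % 2 ^ 64 = k := Nat.mod_eq_of_lt (by omega)
  rw [h1, h2]
  exact Nat.mod_eq_of_lt h

end Gif.Spec.DGifDecompressLine_1
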